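-- pv_equiv track=rewrite | github.com/pypi-data/pypi-mirror-399 | packages/nirs4all/nirs4all-0.6.1-py3-none-any.whl/nirs4all/pipeline/config/_generator/utils/combinatorics.py | generate_combinations_range
-- ===== SOURCE A (Python) =====
-- from itertools import combinations, permutations, product
-- from typing import Any, Iterator, List, Optional, Tuple, TypeVar, Union
--
-- T = TypeVar('T')
--
-- def generate_combinations_range(
--     items: List[T],
--     size_range: Tuple[int, int]
-- ) -> Iterator[Tuple[T, ...]]:
--     """Generate combinations for all sizes in a range.
--
--     Args:
--         items: List of items to combine.
--         size_range: Tuple of (from_size, to_size), inclusive on both ends.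
--
--     Yields:
--         Tuples of items representing each combination for all sizes.
--
--     Examples:
--         >>> list(generate_combinations_range(["A", "B", "C"], (1, 2)))
--         [('A',), ('B',), ('C',), ('A', 'B'), ('A', 'C'), ('B', 'C')]
--     """
--     from_size, to_size = size_range
--     for size in range(from_size, to_size + 1):
--         if size <= len(items):
--             yield from combinations(items, size)
-- ===== SOURCE B (Python) =====
-- def generate_combinations_range(items, size_range):
--     from_size, to_size = size_range
--     n = len(items)
--
--     def nck(m, k):
--         # binomial coefficient, 0 when k < 0 or k > m
--         if k < 0 or m < k:
--             return 0
--         r = 1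
--         for i in range(k):
--             r = r * (m - i) // (i + 1)
--         return r
--
--     def unrank(size, r):
--         # lexicographic unranking: decode rank r into the r-th size-combination
--         out = []
--         start = 0
--         k = size
--         while k > 0:
--             c = nck(n - start - 1, k - 1)
--             if r < c:
--                 out.append(items[start])
--                 k -= 1
--             else:
--                 r -= c
--             start += 1
--         return tuple(out)
--
--     for size in range(from_size, to_size + 1):
--         if size <= n:
--             for r in range(nck(n, size)):
--                 yield unrank(size, r)
-- ===== Notes on version B (the rewrite author's own statement) =====
-- stated objective: alternative
-- what changed: Replaces itertools-style recursive enumeration with arithmetic ranking: for each size it computes the binomial count C(n,size) and decodes each rank 0..C(n,size)-1 into its combination by lexicographic unranking with binomial coefficients; negative sizes give count 0 and yield nothing where A raises ValueError.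
import Mathlib
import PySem

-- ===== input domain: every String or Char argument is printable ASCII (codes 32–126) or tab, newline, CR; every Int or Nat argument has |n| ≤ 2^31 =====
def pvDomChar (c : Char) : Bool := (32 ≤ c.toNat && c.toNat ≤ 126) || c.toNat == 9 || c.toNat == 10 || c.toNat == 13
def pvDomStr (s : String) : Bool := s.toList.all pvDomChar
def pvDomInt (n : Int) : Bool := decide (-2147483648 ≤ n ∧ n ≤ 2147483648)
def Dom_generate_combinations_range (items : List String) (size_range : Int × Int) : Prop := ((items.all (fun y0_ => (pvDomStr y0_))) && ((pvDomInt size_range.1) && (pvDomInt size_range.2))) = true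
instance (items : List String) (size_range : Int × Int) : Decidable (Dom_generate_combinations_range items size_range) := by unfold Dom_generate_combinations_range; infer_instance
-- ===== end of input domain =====

-- B replaces itertools-style recursive enumeration with arithmetic ranking: compute C(n,size)
-- and decode every rank into its combination by lexicographic unranking.
-- Objective: alternative algorithm, same output; both ports materialise the generator's yields.

-- ===== PORT A =====
-- itertools.combinations(items, k) as its documented recursive equivalent (lexicographic by index).
def pvCombsA : Nat → List String → List (List String)
  | 0, _ => [[]]
  | _ + 1, [] => []
  | k + 1, x :: xs => (pvCombsA k xs).map (fun c => x :: c) ++ pvCombsA (k + 1) xs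

def generate_combinations_range (items : List String) (size_range : Int × Int) : List (List String) :=
  let from_size := size_range.1
  let to_size := size_range.2
  (PySem.List.pyRange from_size (to_size + 1) 1).foldl
    (fun acc size =>
      if size ≤ (items.length : Int) then acc ++ pvCombsA size.toNat items else acc) []

-- ===== PORT B =====
-- Source B's nck(m, k): multiplicative binomial loop, 0 outside 0 ≤ k ≤ m.
def pvNck (m k : Int) : Int :=
  if k < 0 || m < k then 0
  else (PySem.List.pyRange 0 k 1).foldl
    (fun r i => PySem.Int.floordiv (r * (m - i)) (i + 1)) 1

-- Source B's unrank while-loop over (out, start, k, r), transcribed as structural recursion on the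
-- suffix items[start:] (the same state; items[start] is the suffix's head). The unreachable
-- empty-suffix case (r is always < the remaining count) returns the accumulated prefix.
def pvUnrankGo : List String → Nat → Nat → List String
  | _, 0, _ => []
  | [], _ + 1, _ => []
  | x :: xs, k + 1, r =>
      let c := pvNck (xs.length : Int) (k : Int)
      if (r : Int) < c then x :: pvUnrankGo xs k r
      else pvUnrankGo xs (k + 1) (r - c.toNat)

def generate_combinations_range_alt (items : List String) (size_range : Int × Int) : List (List String) :=
  let from_size := size_range.1
  let to_size := size_range.2
  let n := (items.length : Int)
  (PySem.List.pyRange from_size (to_size + 1) 1).foldl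
    (fun acc size =>
      if size ≤ n then
        acc ++ (List.range (pvNck n size).toNat).map (fun r => pvUnrankGo items size.toNat r)
      else acc) []

-- ===== PRECONDITION & SPEC =====
-- Pre_ excludes exactly the inputs where A raises ValueError: a nonempty size range starting below 0
-- (itertools.combinations rejects a negative r).
def Pre_generate_combinations_range (items : List String) (size_range : Int × Int) : Prop :=
  0 ≤ size_range.1 ∨ size_range.2 < size_range.1
instance (items : List String) (size_range : Int × Int) : Decidable (Pre_generate_combinations_range items size_range) := by unfold Pre_generate_combinations_range; infer_instance

def pvWitness_generate_combinations_range : List String × (Int × Int) := (["A", "B", "C"], (1, 2))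

def Spec_generate_combinations_range (items : List String) (size_range : Int × Int) (out : List (List String)) : Prop := out = generate_combinations_range_alt items size_range
instance (items : List String) (size_range : Int × Int) (out : List (List String)) : Decidable (Spec_generate_combinations_range items size_range out) := by unfold Spec_generate_combinations_range; infer_instance

-- ===== CLAIM (what is proved, stated in full; the proofs are below) =====
def Claim_equal_generate_combinations_range : Prop := ∀ (items : List String) (size_range : Int × Int), Dom_generate_combinations_range items size_range → Pre_generate_combinations_range items size_range → Spec_generate_combinations_range items size_range (generate_combinations_range items size_range)


-- ===== LEMMAS AND PROOFS =====

-- Loop invariant of the multiplicative binomial loop: after j steps the accumulator is C(m, j).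
lemma pvNck_loop (m : Nat) : ∀ j : Nat, j ≤ m →
    (PySem.List.pyRange 0 (j : Int) 1).foldl
      (fun r i => PySem.Int.floordiv (r * ((m : Int) - i)) (i + 1)) 1 = (Nat.choose m j : Int) := by
  intro j
  induction j with
  | zero => intro _; rw [PySem.List.pyRange_one_eq_nil (by omega)]; simp
  | succ j ih =>
    intro hjm
    have hcast : ((j + 1 : Nat) : Int) = (j : Int) + 1 := by push_cast; ring
    rw [hcast, PySem.List.pyRange_one_succ_right (by positivity), List.foldl_append,
      ih (by omega)]
    simp only [List.foldl_cons, List.foldl_nil]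
    have hlt : j < m := by omega
    have h1 : (Nat.choose m j : Int) * ((m : Int) - (j : Int)) =
        (Nat.choose m (j + 1) : Int) * ((j : Int) + 1) := by
      have h := congrArg (fun t : Nat => (t : Int)) (Nat.choose_succ_right_eq m j)
      push_cast [Nat.cast_sub (le_of_lt hlt)] at h
      linarith
    rw [h1, PySem.Int.floordiv_eq_ediv_of_pos (by positivity),
      Int.mul_ediv_cancel _ (by positivity)]

-- The multiplicative loop computes the binomial coefficient exactly.
lemma pvNck_eq_choose (m k : Nat) : pvNck (m : Int) (k : Int) = (Nat.choose m k : Int) := by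
  unfold pvNck
  by_cases h : m < k
  · rw [if_pos (by simp; omega), Nat.choose_eq_zero_of_lt h]; rfl
  · rw [if_neg (by simp; omega)]
    exact pvNck_loop m k (by omega)

-- Lexicographic unranking over all ranks reproduces itertools' enumeration order.
lemma pvUnrank_map_range (xs : List String) : ∀ k : Nat,
    (List.range (Nat.choose xs.length k)).map (fun r => pvUnrankGo xs k r) = pvCombsA k xs := by
  induction xs with
  | nil =>
    intro k
    cases k with
    | zero => rfl
    | succ k => simp [pvCombsA]
  | cons x xs ih =>
    intro k
    cases k with
    | zero => rfl
    | succ k =>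
      rw [List.length_cons, Nat.choose_succ_succ, List.range_add, List.map_append,
        List.map_map]
      have hfst : (List.range (Nat.choose xs.length k)).map
          (fun r => pvUnrankGo (x :: xs) (k + 1) r) =
          (pvCombsA k xs).map (fun c => x :: c) := by
        rw [← ih k, List.map_map]
        apply List.map_congr_left
        intro r hr
        have hrlt : r < Nat.choose xs.length k := List.mem_range.mp hr
        simp only [pvUnrankGo, Function.comp, pvNck_eq_choose]
        rw [if_pos (by exact_mod_cast hrlt)]
      have hsnd : (List.range (Nat.choose xs.length (k + 1))).map
          ((fun r => pvUnrankGo (x :: xs) (k + 1) r) ∘ fun i => Nat.choose xs.length k + i) =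
          pvCombsA (k + 1) xs := by
        rw [← ih (k + 1)]
        apply List.map_congr_left
        intro i _
        simp only [pvUnrankGo, Function.comp, pvNck_eq_choose]
        rw [if_neg (by push_cast; omega), Int.toNat_natCast,
          Nat.add_sub_cancel_left]
      rw [hfst, hsnd]
      rfl

-- ===== VERDICT (by name: the statement is the Claim_ definition above) =====
theorem generate_combinations_range_spec : Claim_equal_generate_combinations_range := by
  intro items size_range _ hpre
  unfold Spec_generate_combinations_range generate_combinations_range generate_combinations_range_alt
  rcases hpre with h0 | hlt
  · apply PySem.List.foldl_congr_mem
    intro acc x hx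
    have hx' := (PySem.List.mem_pyRange_one).mp hx
    have hx0 : 0 ≤ x := le_trans h0 hx'.1
    by_cases hle : x ≤ (items.length : Int)
    · have hxc : x = ((x.toNat : Nat) : Int) := (Int.toNat_of_nonneg hx0).symm
      rw [if_pos hle, if_pos hle, hxc, pvNck_eq_choose]
      simp only [Int.toNat_natCast]
      rw [pvUnrank_map_range items x.toNat]
    · rw [if_neg hle, if_neg hle]
  · simp only []
    rw [PySem.List.pyRange_one_eq_nil (by omega : size_range.2 + 1 ≤ size_range.1)]
    rfl
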